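-- pv_equiv track=rewrite | github.com/chlendyd7/Algorithm | 레거시/TODO/기업/모빌/3.py | solution
-- ===== SOURCE A (Python) =====
-- def solution(D, T):
--
--     def check(i):
--         if 'P' in T[i]:
--             exist[0] = i
--             time[0] += T[i].count('P')
--         if 'G' in T[i]:
--             exist[1] = i
--             time[1] += T[i].count('G')
--         if 'M' in T[i]:
--             exist[2] = i
--             time[2] += T[i].count('M')
--
--     dis = [0] * len(D)
--     dis[0] = D[0]
--     exist = [0] * 3
--     time = [0] * 3
--     check(0)
--     # 거리 누적합 계산
--     for i in range(1, len(D)):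
--         dis[i] = D[i] + dis[i-1]
--         check(i)
--         # T에서 각 문자 'P', 'G', 'M'에 대해 처리
--
--
--     answer = 0
--     # 최대 값을 찾기
--     for k in range(3):
--         answer = max(answer, dis[exist[k]] * 2 + time[k])
--
--     return answer
-- ===== SOURCE B (Python) =====
-- def solution(D, T):
--     n = len(D)
--     # character-frequency table of all rows A ever reads, built in one pass
--     counts = {}
--     for ch in "".join(T[:n]):
--         counts[ch] = counts.get(ch, 0) + 1
--     best = 0
--     for c in "PGM":
--         last = 0
--         for i in range(n - 1, -1, -1):  # last occurrence: scan backwards, stop at first hit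
--             if c in T[i]:
--                 last = i
--                 break
--         best = max(best, 2 * sum(D[:last + 1]) + counts.get(c, 0))
--     return best
-- ===== Notes on version B (the rewrite author's own statement) =====
-- stated objective: alternative
-- what changed: A's single combined forward pass with mutable dis/exist/time arrays and an inner check() is replaced by a character-frequency dict built once over the joined rows (the per-row .count calls disappear), a backward scan with early break to find each character's last row, and a direct slice sum instead of a prefix array.
import Mathlib
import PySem

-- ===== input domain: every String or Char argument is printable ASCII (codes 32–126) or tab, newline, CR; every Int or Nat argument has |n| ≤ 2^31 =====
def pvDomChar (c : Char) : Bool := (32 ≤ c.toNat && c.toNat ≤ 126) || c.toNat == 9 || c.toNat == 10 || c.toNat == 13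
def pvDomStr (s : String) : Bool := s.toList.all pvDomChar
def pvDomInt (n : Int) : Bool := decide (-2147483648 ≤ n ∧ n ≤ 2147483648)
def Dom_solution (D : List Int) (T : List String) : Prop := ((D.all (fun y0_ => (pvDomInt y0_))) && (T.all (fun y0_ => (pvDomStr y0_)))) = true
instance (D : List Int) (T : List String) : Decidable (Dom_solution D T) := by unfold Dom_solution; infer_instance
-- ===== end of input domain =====

-- B replaces A's combined forward pass (mutable dis/exist/time arrays updated by an inner check())
-- with a character-frequency dict built once over the joined rows, a backward early-break scan for
-- each character's last row, and a direct slice sum (objective: alternative).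

-- ===== PORT A =====
-- Python's inner 'check(i)': the mutated (exist, time) pair threaded as state
def pvCheckA (T : List String) (i : Int) (st : List Int × List Int) : List Int × List Int :=
  let s := PySem.List.pyGetD T i ""
  let st := if PySem.Str.isIn "P" s then
      (PySem.List.pySetD st.1 0 i,
       PySem.List.pySetD st.2 0 (PySem.List.pyGetD st.2 0 0 + (PySem.Str.count s "P" : Int)))
    else st
  let st := if PySem.Str.isIn "G" s then
      (PySem.List.pySetD st.1 1 i,
       PySem.List.pySetD st.2 1 (PySem.List.pyGetD st.2 1 0 + (PySem.Str.count s "G" : Int)))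
    else st
  if PySem.Str.isIn "M" s then
      (PySem.List.pySetD st.1 2 i,
       PySem.List.pySetD st.2 2 (PySem.List.pyGetD st.2 2 0 + (PySem.Str.count s "M" : Int)))
  else st

def solution (D : List Int) (T : List String) : Int :=
  let n := D.length
  let dis0 := PySem.List.pySetD (List.replicate n (0:Int)) 0 (PySem.List.pyGetD D 0 0)
  let st0 := pvCheckA T 0 (List.replicate 3 (0:Int), List.replicate 3 (0:Int))
  let p := (PySem.List.pyRange 1 (n:Int) 1).foldl
      (fun (p : List Int × (List Int × List Int)) i =>
        (PySem.List.pySetD p.1 i (PySem.List.pyGetD D i 0 + PySem.List.pyGetD p.1 (i-1) 0),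
         pvCheckA T i p.2)) (dis0, st0)
  (PySem.List.pyRange 0 3 1).foldl
    (fun ans k =>
      max ans (PySem.List.pyGetD p.1 (PySem.List.pyGetD p.2.1 k 0) 0 * 2 + PySem.List.pyGetD p.2.2 k 0)) 0

-- ===== PORT B =====
-- B's backward loop with break: 'for i in range(n-1,-1,-1): if c in T[i]: last = i; break' with last = 0
-- by default; the i = 0 iteration can only set last to its default 0, so the recursion stops at 0.
def pvLastB (T : List String) (c : String) : Nat → Nat
  | 0 => 0
  | i + 1 => if PySem.Str.isIn c (T.getD i "") then i else pvLastB T c i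

def solution_alt (D : List Int) (T : List String) : Int :=
  let n := D.length
  -- counts[ch] = counts.get(ch, 0) + 1 over "".join(T[:n]); Python's iteration over a str yields
  -- 1-character strings, ported as String.singleton ch
  let counts := (PySem.Str.join "" (PySem.List.slice T none (some (n:Int)))).toList.foldl
      (fun (d : PySem.Dict String Int) ch =>
        d.insert (String.singleton ch) (d.getD (String.singleton ch) 0 + 1)) PySem.Dict.empty
  -- for c in "PGM" yields the 1-character strings "P", "G", "M"
  ["P", "G", "M"].foldl
    (fun best c =>
      let last := pvLastB T c n
      max best (2 * (PySem.List.slice D none (some ((last : Int) + 1))).sum + counts.getD c 0)) 0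

-- ===== PRECONDITION & SPEC =====
-- Pre_ excludes exactly the inputs where A raises IndexError: empty D (the D[0] read) and T shorter than D (the T[i] reads).
def Pre_solution (D : List Int) (T : List String) : Prop := D ≠ [] ∧ D.length ≤ T.length
instance (D : List Int) (T : List String) : Decidable (Pre_solution D T) := by unfold Pre_solution; infer_instance
def pvWitness_solution : List Int × List String := ([1, 2], ["P", "GM"])

def Spec_solution (D : List Int) (T : List String) (out : Int) : Prop := out = solution_alt D T
instance (D : List Int) (T : List String) (out : Int) : Decidable (Spec_solution D T out) := by unfold Spec_solution; infer_instance

-- ===== CLAIM (what is proved, stated in full; the proofs are below) =====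
def Claim_equal_solution : Prop := ∀ (D : List Int) (T : List String), Dom_solution D T → Pre_solution D T → Spec_solution D T (solution D T)

-- ===== LEMMAS AND PROOFS =====

-- one channel (one character) of A's combined scan, over Int indices
def pvStepA (T : List String) (c : String) (p : Int × Int) (i : Int) : Int × Int :=
  if PySem.Str.isIn c (PySem.List.pyGetD T i "") then
    (i, p.2 + (PySem.Str.count (PySem.List.pyGetD T i "") c : Int))
  else p

-- the same channel over Nat indices, split into its two independent components
def pvFst (T : List String) (c : String) (b : Nat) (i : Nat) : Nat :=
  if PySem.Str.isIn c (T.getD i "") then i else b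
def pvSnd (T : List String) (c : String) (x : Int) (i : Nat) : Int :=
  if PySem.Str.isIn c (T.getD i "") then x + (PySem.Str.count (T.getD i "") c : Int) else x
def pvStepN (T : List String) (c : String) (p : Nat × Int) (i : Nat) : Nat × Int :=
  (pvFst T c p.1 i, pvSnd T c p.2 i)

lemma pvStepA_cast_one (T : List String) (c : String) (b i : Nat) (x : Int) :
    pvStepA T c ((b : Int), x) ((i : Nat) : Int) = (((pvStepN T c (b, x) i).1 : Int), (pvStepN T c (b, x) i).2) := by
  simp only [pvStepA, pvStepN, pvFst, pvSnd, PySem.List.pyGetD_natCast]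
  split_ifs <;> rfl

-- A's channel over cast Nat indices is the Nat-index channel fold
lemma pvStepA_cast (T : List String) (c : String) (l : List Nat) :
    ∀ (b : Nat) (x : Int),
      l.foldl (fun p k => pvStepA T c p ((k : Nat) : Int)) ((b : Int), x) =
        (((l.foldl (pvStepN T c) (b, x)).1 : Int), (l.foldl (pvStepN T c) (b, x)).2) := by
  induction l with
  | nil => intro b x; simp
  | cons i l ih =>
    intro b x
    rw [List.foldl_cons, List.foldl_cons, pvStepA_cast_one]
    exact ih (pvStepN T c (b, x) i).1 (pvStepN T c (b, x) i).2

-- one application of check is one step of each of the three channels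
lemma pvCheckA_eq (T : List String) (i e0 e1 e2 t0 t1 t2 : Int) :
    pvCheckA T i ([e0, e1, e2], [t0, t1, t2]) =
      ([(pvStepA T "P" (e0, t0) i).1, (pvStepA T "G" (e1, t1) i).1, (pvStepA T "M" (e2, t2) i).1],
       [(pvStepA T "P" (e0, t0) i).2, (pvStepA T "G" (e1, t1) i).2, (pvStepA T "M" (e2, t2) i).2]) := by
  simp only [pvCheckA, pvStepA]
  split_ifs <;> rfl

-- A's check-fold decomposes into three independent channel folds
lemma pvCheckA_fold (T : List String) (l : List Int) :
    ∀ (e0 e1 e2 t0 t1 t2 : Int),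
      l.foldl (fun st i => pvCheckA T i st) ([e0, e1, e2], [t0, t1, t2]) =
        ([(l.foldl (pvStepA T "P") (e0, t0)).1,
          (l.foldl (pvStepA T "G") (e1, t1)).1,
          (l.foldl (pvStepA T "M") (e2, t2)).1],
         [(l.foldl (pvStepA T "P") (e0, t0)).2,
          (l.foldl (pvStepA T "G") (e1, t1)).2,
          (l.foldl (pvStepA T "M") (e2, t2)).2]) := by
  induction l with
  | nil => intro e0 e1 e2 t0 t1 t2; rfl
  | cons i l ih =>
    intro e0 e1 e2 t0 t1 t2
    rw [List.foldl_cons, pvCheckA_eq, ih]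
    simp only [List.foldl_cons]

-- the intended prefix-sum list
def pvPref (D : List Int) : List Int := (List.range D.length).map (fun i => (D.take (i + 1)).sum)

lemma pvPref_length (D : List Int) : (pvPref D).length = D.length := by simp [pvPref]

lemma pvPref_getElem (D : List Int) (i : Nat) (h : i < D.length) :
    (pvPref D)[i]'(by simpa [pvPref_length]) = (D.take (i + 1)).sum := by
  simp [pvPref]

-- A's dis fold builds the prefix sums, left to right
lemma pvDis_fold (D : List Int) (hD : D ≠ []) :
    ∀ (k : Nat), 1 + k ≤ D.length →
      (PySem.List.pyRange 1 ((1 + k : Nat) : Int) 1).foldl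
        (fun (dis : List Int) i =>
          PySem.List.pySetD dis i (PySem.List.pyGetD D i 0 + PySem.List.pyGetD dis (i - 1) 0))
        (PySem.List.pySetD (List.replicate D.length (0:Int)) 0 (PySem.List.pyGetD D 0 0)) =
      (pvPref D).take (1 + k) ++ List.replicate (D.length - (1 + k)) 0 := by
  intro k
  induction k with
  | zero =>
    intro _
    rw [PySem.List.pyRange_one_eq_nil (by norm_num)]
    obtain ⟨d, D', rfl⟩ : ∃ d D', D = d :: D' := by
      cases D with
      | nil => exact absurd rfl hD
      | cons d D' => exact ⟨d, D', rfl⟩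
    simp [PySem.List.pySetD_of_nonneg, PySem.List.pyGetD_zero, pvPref, List.replicate_succ,
      List.range_succ_eq_map]
  | succ k ih =>
    intro h
    have hk : 1 + k ≤ D.length := by omega
    have hm : 1 + k < D.length := by omega
    have hcast : ((1 + (k + 1) : Nat) : Int) = ((1 + k : Nat) : Int) + 1 := by push_cast; ring
    rw [hcast, PySem.List.pyRange_one_succ_right (by exact_mod_cast Nat.le_add_right 1 k),
      List.foldl_append, ih hk, List.foldl_cons, List.foldl_nil]
    set m := 1 + k with hmdef
    set S := (pvPref D).take m ++ List.replicate (D.length - m) 0 with hS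
    have hlenS : S.length = D.length := by
      simp [hS, pvPref_length]
      omega
    have htake : ((pvPref D).take m).length = m := by
      simp [pvPref_length]; omega
    have hidx : ((m : Int) - 1) = ((m - 1 : Nat) : Int) := by omega
    have hr1 : PySem.List.pyGetD S ((m : Int) - 1) 0 = (D.take m).sum := by
      rw [hidx, PySem.List.pyGetD_natCast]
      have hlt : m - 1 < S.length := by rw [hlenS]; omega
      rw [List.getD_eq_getElem S 0 hlt]
      have hlt2 : m - 1 < ((pvPref D).take m).length := by omega
      rw [List.getElem_append_left hlt2, List.getElem_take]
      rw [pvPref_getElem D (m - 1) (by omega), show m - 1 + 1 = m from by omega]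
    have hr2 : PySem.List.pyGetD D ((m : Nat) : Int) 0 = D[m]'hm := by
      rw [PySem.List.pyGetD_natCast, List.getD_eq_getElem D 0 hm]
    rw [hr1, hr2, PySem.List.pySetD_natCast]
    have hv : D[m]'hm + (D.take m).sum = (D.take (m + 1)).sum := by
      rw [List.sum_take_succ D m hm]; ring
    rw [hv]
    rw [show S.set m (D.take (m+1)).sum
        = (pvPref D).take m ++ (List.replicate (D.length - m) (0:Int)).set (m - ((pvPref D).take m).length) (D.take (m+1)).sum from by
      rw [hS]; exact List.set_append_right _ _ (by omega)]
    have hrep : D.length - m = (D.length - (m + 1)) + 1 := by omega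
    rw [htake, Nat.sub_self, hrep, List.replicate_succ, List.set_cons_zero,
      show (1 + (k + 1)) = m + 1 from by omega]
    rw [show (pvPref D).take (m + 1) = ((pvPref D).take m).concat ((pvPref D)[m]'(by rw [pvPref_length]; omega)) from
      (List.take_concat_get (by rw [pvPref_length]; omega)).symm]
    rw [pvPref_getElem D m hm]
    simp

-- the forward last-update fold equals B's backward early-break scan
lemma pvFst_fold (T : List String) (c : String) :
    ∀ (n : Nat), (List.range n).foldl (pvFst T c) 0 = pvLastB T c n := by
  intro n
  induction n with
  | zero => rfl
  | succ n ih =>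
    rw [List.range_succ, List.foldl_append, ih, List.foldl_cons, List.foldl_nil]
    cases n with
    | zero => simp [pvFst, pvLastB]
    | succ m =>
      simp only [pvFst, pvLastB]

lemma pvLastB_le (T : List String) (c : String) : ∀ (n : Nat), pvLastB T c (n + 1) ≤ n := by
  intro n
  induction n with
  | zero => simp only [pvLastB]; split_ifs <;> simp
  | succ n ih =>
    rw [show pvLastB T c (n + 1 + 1)
        = if PySem.Str.isIn c (T.getD (n + 1) "") then n + 1 else pvLastB T c (n + 1) from rfl]
    split_ifs with h
    · omega
    · exact Nat.le_succ_of_le ih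

lemma pvLastB_lt (T : List String) (c : String) (n : Nat) (hn : 0 < n) : pvLastB T c n < n := by
  cases n with
  | zero => omega
  | succ n => exact Nat.lt_succ_of_le (pvLastB_le T c n)

-- Chars.count with a single-character needle is List.count
lemma pvCountGo_singleton (c : Char) : ∀ (fuel : Nat) (l : List Char), l.length ≤ fuel → ∀ (acc : Nat),
    PySem.Chars.count.go [c] fuel l acc = acc + l.count c := by
  intro fuel
  induction fuel with
  | zero =>
    intro l hl acc
    have : l = [] := List.length_eq_zero_iff.mp (Nat.le_zero.mp hl)
    subst this; simp [PySem.Chars.count.go]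
  | succ fuel ih =>
    intro l hl acc
    cases l with
    | nil => simp [PySem.Chars.count.go]
    | cons h t =>
      rw [PySem.Chars.count.go]
      simp only [List.isPrefixOf, Bool.and_true]
      by_cases hc : c = h
      · subst hc
        simp only [BEq.rfl, if_pos]
        simp only [List.length_cons, List.length_nil, Nat.zero_add, List.drop_one, List.tail_cons]
        rw [ih t (by simpa using Nat.succ_le_succ_iff.mp hl) (acc + 1)]
        simp [List.count_cons_self]
        omega
      · rw [if_neg (by simp [hc])]
        rw [ih t (by simpa using Nat.succ_le_succ_iff.mp hl) acc]
        simp [Ne.symm hc]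

lemma pvCount_singleton (cs : List Char) (c : Char) : PySem.Chars.count cs [c] = cs.count c := by
  rw [PySem.Chars.count]
  simp [pvCountGo_singleton c cs.length cs le_rfl 0]

lemma pvStrCount_singleton (s : String) (c : Char) :
    PySem.Str.count s (String.singleton c) = s.toList.count c := by
  rw [PySem.Str.count_eq, show (String.singleton c).toList = [c] from by simp, pvCount_singleton]

-- if c does not occur in s, its count in s is 0
lemma pvCount_of_notIn (s : String) (c : Char)
    (h : PySem.Str.isIn (String.singleton c) s = false) : PySem.Str.count s (String.singleton c) = 0 := by
  rw [pvStrCount_singleton]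
  apply List.count_eq_zero.mpr
  intro hmem
  rw [PySem.Str.isIn_eq, show (String.singleton c).toList = [c] from by simp,
    PySem.Chars.isIn_eq_false_iff] at h
  obtain ⟨u, v, hs⟩ := List.append_of_mem hmem
  exact h ⟨u, v, by rw [hs]; simp⟩

-- the count-accумulating fold sums the per-row counts (a miss contributes 0)
lemma pvSnd_fold (T : List String) (c : Char) (l : List Nat) :
    ∀ (x : Int), l.foldl (pvSnd T (String.singleton c)) x =
      x + (l.map (fun i => ((T.getD i "").toList.count c : Int))).sum := by
  induction l with
  | nil => intro x; simp
  | cons i l ih =>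
    intro x
    rw [List.foldl_cons, List.map_cons, List.sum_cons]
    by_cases h : PySem.Str.isIn (String.singleton c) (T.getD i "") = true
    · rw [show pvSnd T (String.singleton c) x i
          = x + (PySem.Str.count (T.getD i "") (String.singleton c) : Int) from by
        unfold pvSnd; rw [if_pos h]]
      rw [ih, pvStrCount_singleton]
      ring
    · rw [show pvSnd T (String.singleton c) x i = x from by
        unfold pvSnd; rw [if_neg h]]
      rw [ih, show ((T.getD i "").toList.count c : Int) = 0 from by
        have := pvCount_of_notIn (T.getD i "") c (Bool.not_eq_true _ |>.mp (by exact h))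
        rw [pvStrCount_singleton] at this
        exact_mod_cast this]
      ring

lemma pvJoin_nil_flatten (ls : List (List Char)) : PySem.Chars.join [] ls = ls.flatten := by
  induction ls with
  | nil => rfl
  | cons a ls ih =>
    cases ls with
    | nil => simp [PySem.Chars.join, List.intercalate]
    | cons b ls =>
      rw [PySem.Chars.join_cons_cons, ih]
      simp

lemma pvTake_eq_range_map {α : Type} (d : α) (T : List α) (n : Nat) (hn : n ≤ T.length) :
    T.take n = (List.range n).map (fun i => T.getD i d) := by
  apply List.ext_getElem (by simpa)
  intro i h1 h2
  simp only [List.getElem_take, List.getElem_map, List.getElem_range]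
  rw [List.getD_eq_getElem T d (by simp at h1; omega)]

-- B's character-frequency dict, looked up at a single character, is the sum of the per-row counts
lemma pvCounts_getD (T : List String) (n : Nat) (hn : n ≤ T.length) (c : Char) :
    ((PySem.Str.join "" (PySem.List.slice T none (some (n:Int)))).toList.foldl
        (fun (d : PySem.Dict String Int) ch =>
          d.insert (String.singleton ch) (d.getD (String.singleton ch) 0 + 1)) PySem.Dict.empty).getD
      (String.singleton c) 0
    = ((List.range n).map (fun i => ((T.getD i "").toList.count c : Int))).sum := by
  rw [PySem.List.slice_to T (by positivity), Int.toNat_natCast]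
  rw [show ((PySem.Str.join "" (T.take n)).toList.foldl
        (fun (d : PySem.Dict String Int) ch =>
          d.insert (String.singleton ch) (d.getD (String.singleton ch) 0 + 1)) PySem.Dict.empty)
      = (((PySem.Str.join "" (T.take n)).toList.map String.singleton).foldl
          (fun (d : PySem.Dict String Int) x => d.insert x (d.getD x 0 + 1)) PySem.Dict.empty) from by
    rw [List.foldl_map]]
  rw [PySem.Dict.getD_foldl_insert_add_one]
  have hcnt : ((PySem.Str.join "" (T.take n)).toList.map String.singleton).count (String.singleton c)
      = (PySem.Str.join "" (T.take n)).toList.count c := by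
    simp only [List.count, List.countP_map, Function.comp_def]
    apply List.countP_congr
    intro a _
    simp only [beq_iff_eq]
    constructor
    · intro hs; have := congrArg String.toList hs; simpa [String.singleton] using this
    · intro hs; rw [hs]
  rw [hcnt]
  rw [PySem.Str.toList_join, show ("" : String).toList = [] from rfl, pvJoin_nil_flatten]
  rw [List.count_flatten, List.map_map]
  rw [pvTake_eq_range_map "" T n hn, List.map_map]
  have hempty : (PySem.Dict.empty : PySem.Dict String Int).getD (String.singleton c) 0 = 0 := by simp
  rw [hempty]
  rw [Nat.cast_list_sum, List.map_map]
  simp [Function.comp_def]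

-- per-channel equality: A's forward channel value = B's term for that character
lemma pvChannel_eq (D : List Int) (T : List String) (c : Char)
    (hD : D ≠ []) (hT : D.length ≤ T.length) :
    PySem.List.pyGetD (pvPref D)
        ((((List.range D.length).foldl (pvStepN T (String.singleton c)) (0, 0)).1 : Int)) 0 * 2
      + ((List.range D.length).foldl (pvStepN T (String.singleton c)) (0, 0)).2
    = 2 * (PySem.List.slice D none (some ((pvLastB T (String.singleton c) D.length : Int) + 1))).sum
      + ((PySem.Str.join "" (PySem.List.slice T none (some ((D.length : Nat):Int)))).toList.foldl
          (fun (d : PySem.Dict String Int) ch =>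
            d.insert (String.singleton ch) (d.getD (String.singleton ch) 0 + 1)) PySem.Dict.empty).getD
          (String.singleton c) 0 := by
  have hn : 0 < D.length := List.length_pos_iff.mpr hD
  have hf : (List.range D.length).foldl (pvStepN T (String.singleton c)) (0, 0)
      = ((List.range D.length).foldl (pvFst T (String.singleton c)) 0,
         (List.range D.length).foldl (pvSnd T (String.singleton c)) 0) := by
    rw [show pvStepN T (String.singleton c)
        = (fun p i => (pvFst T (String.singleton c) p.1 i, pvSnd T (String.singleton c) p.2 i)) from rfl]
    rw [PySem.List.foldl_prod_mk]
  rw [hf]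
  rw [pvFst_fold, pvSnd_fold T c (List.range D.length) 0, pvCounts_getD T D.length hT c]
  set l := pvLastB T (String.singleton c) D.length with hl
  have hlt : l < D.length := pvLastB_lt T (String.singleton c) D.length hn
  have h1 : PySem.List.pyGetD (pvPref D) ((l : Nat) : Int) 0 = (D.take (l + 1)).sum := by
    rw [PySem.List.pyGetD_natCast, List.getD_eq_getElem (pvPref D) 0 (by rw [pvPref_length]; exact hlt)]
    exact pvPref_getElem D l hlt
  have h2 : PySem.List.slice D none (some ((l : Int) + 1)) = D.take (l + 1) := by
    rw [show ((l : Int) + 1) = ((l + 1 : Nat) : Int) from by push_cast; ring,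
      PySem.List.slice_to D (by positivity), Int.toNat_natCast]
  rw [h1, h2]
  ring

theorem solution_eq (D : List Int) (T : List String) (hne : D ≠ []) (hle : D.length ≤ T.length) :
    solution D T = solution_alt D T := by
  have hn : 1 ≤ D.length := List.length_pos_iff.mpr hne
  have hdis := pvDis_fold D hne (D.length - 1) (by omega)
  rw [show 1 + (D.length - 1) = D.length from by omega, Nat.sub_self, List.replicate_zero,
    List.append_nil, List.take_of_length_le (le_of_eq (pvPref_length D))] at hdis
  have hchan : ∀ c : String,
      (List.range D.length).foldl (fun x y => pvStepA T c x ((y : Nat) : Int)) ((0 : Int), (0 : Int)) =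
        ((((List.range D.length).foldl (pvStepN T c) (0, 0)).1 : Int),
         ((List.range D.length).foldl (pvStepN T c) (0, 0)).2) := by
    intro c
    simpa using pvStepA_cast T c (List.range D.length) 0 0
  have hst : (PySem.List.pyRange 1 (D.length : Int) 1).foldl (fun st i => pvCheckA T i st)
      (pvCheckA T 0 (List.replicate 3 (0:Int), List.replicate 3 (0:Int)))
      = ([(((List.range D.length).foldl (pvStepN T "P") (0, 0)).1 : Int),
          (((List.range D.length).foldl (pvStepN T "G") (0, 0)).1 : Int),
          (((List.range D.length).foldl (pvStepN T "M") (0, 0)).1 : Int)],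
         [((List.range D.length).foldl (pvStepN T "P") (0, 0)).2,
          ((List.range D.length).foldl (pvStepN T "G") (0, 0)).2,
          ((List.range D.length).foldl (pvStepN T "M") (0, 0)).2]) := by
    have h0 : pvCheckA T 0 (List.replicate 3 (0:Int), List.replicate 3 (0:Int))
        = List.foldl (fun st i => pvCheckA T i st) (([0,0,0],[0,0,0]) : List Int × List Int) [0] := rfl
    have hcons : ([(0:Int)] ++ PySem.List.pyRange 1 (D.length : Int) 1) = PySem.List.pyRange 0 (D.length : Int) 1 := by
      rw [PySem.List.pyRange_one_cons (show (0:Int) < (D.length : Int) from by omega),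
        show ((0:Int) + 1) = 1 from rfl]
      rfl
    rw [h0, ← List.foldl_append, hcons, pvCheckA_fold, PySem.List.pyRange_zero_nat]
    simp only [List.foldl_map]
    rw [hchan "P", hchan "G", hchan "M"]
  simp only [solution, solution_alt]
  rw [PySem.List.foldl_prod_mk
    (fun dis i => PySem.List.pySetD dis i (PySem.List.pyGetD D i 0 + PySem.List.pyGetD dis (i-1) 0))
    (fun st i => pvCheckA T i st)]
  rw [hdis, hst]
  rw [show PySem.List.pyRange 0 3 1 = [0,1,2] from rfl]
  simp only [List.foldl_cons, List.foldl_nil]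
  have g0 : ∀ (a b c : Int), PySem.List.pyGetD [a,b,c] 0 0 = a := fun _ _ _ => rfl
  have g1 : ∀ (a b c : Int), PySem.List.pyGetD [a,b,c] 1 0 = b := fun _ _ _ => rfl
  have g2 : ∀ (a b c : Int), PySem.List.pyGetD [a,b,c] 2 0 = c := fun _ _ _ => rfl
  rw [g0, g0, g1, g1, g2, g2]
  have gP := pvChannel_eq D T 'P' hne hle
  have gG := pvChannel_eq D T 'G' hne hle
  have gM := pvChannel_eq D T 'M' hne hle
  rw [show String.singleton 'P' = "P" from by decide] at gP
  rw [show String.singleton 'G' = "G" from by decide] at gG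
  rw [show String.singleton 'M' = "M" from by decide] at gM
  rw [gP, gG, gM]

-- ===== VERDICT (by name: the statement is the Claim_ definition above) =====
theorem solution_spec : Claim_equal_solution := by
  intro D T _ hPre
  exact solution_eq D T hPre.1 hPre.2
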